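-- pv_equiv track=rewrite | github.com/Echo545/Threshing-Floor | winnow.py | possibleResults
-- ===== SOURCE A (Python) =====
-- def possibleResults(bits):
--     workingStack = []
--     results = []
--
--     # Remove redundant trailing None values
--     while bits[-1] == None and bits[-2] == None:
--         bits.pop()
--
--     workingStack.append(bits)
--
--     while len(workingStack) > 0:
--         current = workingStack.pop()
--
--         if None not in current:
--             results.append(current)
--         else:
--             index = current.index(None)
--             current[index] = "0"
--             workingStack.append(current.copy())
--             current[index] = "1"
--             workingStack.append(current.copy())
--
--     return results
-- ===== SOURCE B (Python) =====
-- # Recursive completion (fill the first None with "1" then "0") after computing the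
-- # trim length arithmetically; unlike A it does not mutate the input list.
-- def possibleResults(bits):
--     n = len(bits)
--     while n > 0 and bits[n - 1] is None:
--         n -= 1
--     trimmed = bits[:n + 1] if n < len(bits) else bits[:]
--     return _complete(trimmed)
--
-- def _complete(lst):
--     if None not in lst:
--         return [lst]
--     i = lst.index(None)
--     return _complete(lst[:i] + ["1"] + lst[i + 1:]) + _complete(lst[:i] + ["0"] + lst[i + 1:])
-- ===== Notes on version B (the rewrite author's own statement) =====
-- stated objective: alternative
-- what changed: Replaces A's explicit work-stack DFS with in-place mutation and list copies by a pure recursion that fills the first None with '1' then '0', and replaces A's pop-loop trimming by computing the trim length arithmetically; B does not mutate the input (equivalence is about the return value).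
-- crash fix: A raises IndexError when bits is empty or all elements are None (the trailing-pop loop runs off the front); B returns the natural completions ([[]] for [], the full enumeration otherwise). — e.g. on possibleResults([none]): A raises IndexError, B returns [["1"], ["0"]]
import Mathlib
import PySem

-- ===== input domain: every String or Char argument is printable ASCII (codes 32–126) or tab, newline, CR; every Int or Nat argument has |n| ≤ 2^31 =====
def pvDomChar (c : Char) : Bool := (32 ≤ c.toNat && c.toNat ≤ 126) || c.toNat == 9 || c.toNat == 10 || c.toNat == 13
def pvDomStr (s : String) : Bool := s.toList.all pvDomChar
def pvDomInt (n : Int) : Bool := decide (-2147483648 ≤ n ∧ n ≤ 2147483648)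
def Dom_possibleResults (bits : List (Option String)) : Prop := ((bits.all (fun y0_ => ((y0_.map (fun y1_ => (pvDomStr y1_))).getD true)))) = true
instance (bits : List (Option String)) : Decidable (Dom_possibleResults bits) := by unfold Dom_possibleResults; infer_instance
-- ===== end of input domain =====

-- B replaces A's explicit work-stack DFS (which mutates `bits` in place) by a pure
-- recursion on the first None; the equivalence proved is about the RETURN value only
-- (A mutates its argument, B does not).

-- ===== PORT A =====

-- number of None entries (helper used only by the termination measures)
def pvNoneCount (l : List (Option String)) : Nat := l.countP (fun b => b == none)

lemma pv_first_none_split (l : List (Option String)) (h : none ∈ l) :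
    ∃ pre suf, l = pre ++ none :: suf ∧ none ∉ pre ∧
      (PySem.List.index? l none).getD 0 = pre.length := by
  have hs : (PySem.List.index? l none).isSome := (PySem.List.index?_isSome_iff _ _).mpr h
  obtain ⟨k, hk⟩ := Option.isSome_iff_exists.mp hs
  obtain ⟨pre, suf, hl, hlen, hpre⟩ := (PySem.List.index?_eq_some_iff _ _ _).mp hk
  exact ⟨pre, suf, hl, hpre, by rw [hk]; simp [hlen]⟩

lemma pv_set_splice (pre suf : List (Option String)) (v : Option String) :
    (pre ++ none :: suf).set pre.length v = pre ++ v :: suf := by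
  induction pre with
  | nil => simp
  | cons a t ih => simp [List.set, ih]

lemma pv_drop_splice (pre suf : List (Option String)) (x : Option String) :
    (pre ++ x :: suf).drop (pre.length + 1) = suf := by
  induction pre with
  | nil => simp
  | cons a t ih => simpa using ih

lemma pvNoneCount_set_lt (l : List (Option String)) (h : none ∈ l) (v : String) :
    pvNoneCount (l.set ((PySem.List.index? l none).getD 0) (some v)) + 1 = pvNoneCount l := by
  obtain ⟨pre, suf, hl, _, hi⟩ := pv_first_none_split l h
  subst hl
  rw [hi, pv_set_splice]
  simp [pvNoneCount, List.countP_append, List.countP_cons]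
  omega

-- port of A's `while bits[-1] == None and bits[-2] == None: bits.pop()`
-- (fuel = length: the loop pops at most length times)
def trimLoopA : Nat → List (Option String) → List (Option String)
  | 0, bits => bits
  | fuel + 1, bits =>
    if PySem.List.pyGet? bits (-1) = some none ∧ PySem.List.pyGet? bits (-2) = some none then
      trimLoopA fuel bits.dropLast
    else bits

-- port of A's workingStack loop (list head = Python stack top; append "0"-copy then
-- "1"-copy = push the two `current.copy()`s, "1" on top)
def loopA : List (List (Option String)) → List (List String) → List (List String)
  | [], results => results
  | current :: rest, results =>
    if h : none ∈ current then
      let i := (PySem.List.index? current none).getD 0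
      loopA (current.set i (some "1") :: current.set i (some "0") :: rest) results
    else
      loopA rest (results ++ [current.filterMap id])
termination_by st _ => (st.map (fun l => 3 ^ (pvNoneCount l + 1))).sum
decreasing_by
  · simp only [List.map_cons, List.sum_cons]
    have h1 := pvNoneCount_set_lt current h "1"
    have h0 := pvNoneCount_set_lt current h "0"
    have hp : 0 < 3 ^ (pvNoneCount (current.set ((PySem.List.index? current none).getD 0) (some "1")) + 1) :=
      pow_pos (by norm_num) _
    rw [← h1] at h0 ⊢
    have h01 : pvNoneCount (current.set ((PySem.List.index? current none).getD 0) (some "0"))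
        = pvNoneCount (current.set ((PySem.List.index? current none).getD 0) (some "1")) := by omega
    rw [h01, pow_succ]
    omega
  · simp only [List.map_cons, List.sum_cons]
    have hp : 0 < 3 ^ (pvNoneCount current + 1) := pow_pos (by norm_num) _
    omega

def possibleResults (bits : List (Option String)) : List (List String) :=
  loopA [trimLoopA bits.length bits] []

-- ===== PORT B =====

-- port of Source B's `_complete`: fill the first None with "1" then "0", recursively
def completeB (lst : List (Option String)) : List (List String) :=
  if h : none ∈ lst then
    let i := (PySem.List.index? lst none).getD 0
    completeB (PySem.List.slice lst none (some (i : Int)) ++ [some "1"] ++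
               PySem.List.slice lst (some ((i : Int) + 1)) none) ++
    completeB (PySem.List.slice lst none (some (i : Int)) ++ [some "0"] ++
               PySem.List.slice lst (some ((i : Int) + 1)) none)
  else [lst.filterMap id]
termination_by pvNoneCount lst
decreasing_by
  all_goals
  · obtain ⟨pre, suf, hl, _, hi⟩ := pv_first_none_split lst h
    subst hl
    rw [hi]
    have hc : ((pre.length : Int) + 1) = ((pre.length + 1 : Nat) : Int) := by push_cast; ring
    rw [PySem.List.slice_to_natCast, hc, PySem.List.slice_from_natCast, List.take_left,
        pv_drop_splice]
    simp [pvNoneCount, List.countP_append]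

-- port of Source B's `while n > 0 and bits[n-1] is None: n -= 1` (recursion on n)
def trimCountB (bits : List (Option String)) : Nat → Nat
  | 0 => 0
  | n + 1 => if PySem.List.pyGet? bits ((n : Nat) : Int) = some none then trimCountB bits n else n + 1

def possibleResults_alt (bits : List (Option String)) : List (List String) :=
  let n := trimCountB bits bits.length
  let trimmed := if n < bits.length then PySem.List.slice bits none (some ((n : Int) + 1)) else bits
  completeB trimmed

-- ===== PRECONDITION & SPEC =====
-- A raises IndexError exactly when bits is empty or all entries are None (the trailing-pop
-- loop runs off the front); Pre_ admits every input on which A returns.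
def Pre_possibleResults (bits : List (Option String)) : Prop := ∃ b ∈ bits, b ≠ none
instance (bits : List (Option String)) : Decidable (Pre_possibleResults bits) := by
  unfold Pre_possibleResults; infer_instance

def pvWitness_possibleResults : List (Option String) := [some "1", none]

-- A raises IndexError when bits is empty or all elements are None; B returns the natural
-- completions there ([[]] for the empty list, the full enumeration otherwise).
def Raises_possibleResults (bits : List (Option String)) : Prop :=
  bits = [] ∨ ∀ b ∈ bits, b = none
instance (bits : List (Option String)) : Decidable (Raises_possibleResults bits) := by
  unfold Raises_possibleResults; infer_instance
def pvRaiseWitness_possibleResults : List (Option String) := [none]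
def pvRaiseWitnessOut_possibleResults : List (List String) := [["1"], ["0"]]

def Spec_possibleResults (bits : List (Option String)) (out : List (List String)) : Prop := out = possibleResults_alt bits
instance (bits : List (Option String)) (out : List (List String)) : Decidable (Spec_possibleResults bits out) := by unfold Spec_possibleResults; infer_instance

-- ===== CLAIM (what is proved, stated in full; the proofs are below) =====
def Claim_equal_possibleResults : Prop := ∀ (bits : List (Option String)), Dom_possibleResults bits → Pre_possibleResults bits → Spec_possibleResults bits (possibleResults bits)

def Claim_raises_possibleResults : Prop :=
  (∀ (bits : List (Option String)), Dom_possibleResults bits → Raises_possibleResults bits → ¬ Pre_possibleResults bits) ∧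
  (Dom_possibleResults (pvRaiseWitness_possibleResults) ∧ Raises_possibleResults (pvRaiseWitness_possibleResults) ∧
    possibleResults_alt (pvRaiseWitness_possibleResults) = pvRaiseWitnessOut_possibleResults)

-- ===== LEMMAS AND PROOFS =====

-- `lst.index(None)` on a list whose first None sits after `pre`
lemma pv_index_eq (pre suf : List (Option String)) (hp : none ∉ pre) :
    PySem.List.index? (pre ++ none :: suf) none = some pre.length :=
  (PySem.List.index?_eq_some_iff _ _ _).mpr ⟨pre, suf, rfl, rfl, hp⟩


lemma completeB_of_mem (pre suf : List (Option String)) (hp : none ∉ pre) :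
    completeB (pre ++ none :: suf) =
      completeB (pre ++ some "1" :: suf) ++ completeB (pre ++ some "0" :: suf) := by
  have h : none ∈ pre ++ none :: suf := by simp
  rw [completeB.eq_def, dif_pos h]
  simp only [pv_index_eq pre suf hp, Option.getD_some]
  have hc : ((pre.length : Int) + 1) = ((pre.length + 1 : Nat) : Int) := by push_cast; ring
  rw [PySem.List.slice_to_natCast, hc, PySem.List.slice_from_natCast, List.take_left,
      pv_drop_splice]
  simp

lemma completeB_of_not_mem (l : List (Option String)) (h : none ∉ l) :
    completeB l = [l.filterMap id] := by
  rw [completeB.eq_def, dif_neg h]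

lemma loopA_eq (st : List (List (Option String))) (res : List (List String)) :
    loopA st res = res ++ st.flatMap completeB := by
  induction st, res using loopA.induct with
  | case1 res => simp [loopA]
  | case2 current rest res h i ih =>
    rw [loopA.eq_def]
    simp only [dif_pos h]
    rw [ih]
    obtain ⟨pre, suf, hl, hp, hi⟩ := pv_first_none_split current h
    subst hl
    rw [show i = pre.length from hi, pv_set_splice, pv_set_splice, List.flatMap_cons,
        List.flatMap_cons, List.flatMap_cons, completeB_of_mem pre suf hp]
    simp
  | case3 current rest res h ih =>
    rw [loopA.eq_def]
    simp only [dif_neg h]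
    simp only [List.filterMap_subtype, List.unattach_attach] at ih
    rw [List.flatMap_cons, completeB_of_not_mem current h, ← List.append_assoc]
    exact ih

-- the trailing-pop loop on base ++ replicate k none keeps base and min k 1 trailing Nones
lemma trimLoopA_spec (base : List (Option String)) (hb : base ≠ []) (hl : base.getLast? ≠ some none) :
    ∀ k fuel, k ≤ fuel →
      trimLoopA fuel (base ++ List.replicate k none) = base ++ List.replicate (min k 1) none := by
  intro k
  induction k using Nat.strong_induction_on with
  | _ k ih =>
    intro fuel hkf
    match k with
    | 0 =>
      cases fuel with
      | zero => simp [trimLoopA]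
      | succ f =>
        have hcond : ¬ (PySem.List.pyGet? (base ++ List.replicate 0 none) (-1) = some none ∧
            PySem.List.pyGet? (base ++ List.replicate 0 none) (-2) = some none) := by
          intro ⟨h1, _⟩
          rw [PySem.List.pyGet?_neg_one] at h1
          simp at h1
          exact hl h1
        rw [trimLoopA, if_neg hcond]
        simp
    | 1 =>
      cases fuel with
      | zero => omega
      | succ f =>
        have hcond : ¬ (PySem.List.pyGet? (base ++ List.replicate 1 none) (-1) = some none ∧
            PySem.List.pyGet? (base ++ List.replicate 1 none) (-2) = some none) := by
          intro ⟨_, h2⟩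
          have hlen : 2 ≤ (base ++ List.replicate 1 none).length := by
            have : 1 ≤ base.length := List.length_pos_iff.mpr hb
            simp; omega
          rw [PySem.List.pyGet?_neg_ofNat _ 2 (by omega) hlen] at h2
          have hlen2 : (base ++ List.replicate 1 none).length - 2 = base.length - 1 := by
            simp
          rw [hlen2] at h2
          have hb1 : base.length - 1 < base.length := by
            have : 1 ≤ base.length := List.length_pos_iff.mpr hb
            omega
          rw [List.getElem?_append_left hb1, ← List.getLast?_eq_getElem?] at h2
          exact hl h2
        rw [trimLoopA, if_neg hcond]
        simp
    | k + 2 =>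
      cases fuel with
      | zero => omega
      | succ f =>
        have hsplit : base ++ List.replicate (k + 2) none
            = (base ++ List.replicate (k + 1) none) ++ [none] := by
          rw [List.replicate_succ' (n := k + 1)]; simp
        have hcond : PySem.List.pyGet? (base ++ List.replicate (k + 2) none) (-1) = some none ∧
            PySem.List.pyGet? (base ++ List.replicate (k + 2) none) (-2) = some none := by
          constructor
          · rw [hsplit, PySem.List.pyGet?_neg_one]
            simp
          · rw [hsplit]
            have hlen : 2 ≤ ((base ++ List.replicate (k + 1) none) ++ [none]).length := by
              simp; omega
            rw [PySem.List.pyGet?_neg_ofNat _ 2 (by omega) hlen]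
            have hlen2 : ((base ++ List.replicate (k + 1) none) ++ [none]).length - 2
                = base.length + k := by simp; omega
            rw [hlen2, List.getElem?_append_left (by simp), List.getElem?_append_right (by omega)]
            simp
        rw [trimLoopA, if_pos hcond, hsplit, List.dropLast_concat,
            ih (k + 1) (by omega) f (by omega)]
        have hmin : min (k + 1) 1 = min (k + 2) 1 := by omega
        rw [hmin]

-- Source B's trim count on base ++ replicate k none is base.length
lemma trimCountB_spec (base : List (Option String)) (hl : base.getLast? ≠ some none) (k : Nat) :
    ∀ k', k' ≤ k → trimCountB (base ++ List.replicate k none) (base.length + k') = base.length := by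
  intro k'
  induction k' with
  | zero =>
    intro _
    cases hbl : base.length with
    | zero => simp [trimCountB]
    | succ m =>
      have hcond : ¬ PySem.List.pyGet? (base ++ List.replicate k none) ((m : Nat) : Int)
          = some none := by
        rw [PySem.List.pyGet?_natCast]
        have hm : m < base.length := by omega
        rw [List.getElem?_append_left hm]
        have hgl : base[m]? = base.getLast? := by
          rw [List.getLast?_eq_getElem?, hbl]
          simp
        rw [hgl]
        exact hl
      simp only [Nat.add_zero]
      rw [trimCountB, if_neg hcond]
  | succ k' ih =>
    intro hk
    have hcond : PySem.List.pyGet? (base ++ List.replicate k none)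
        ((base.length + k' : Nat) : Int) = some none := by
      rw [PySem.List.pyGet?_natCast, List.getElem?_append_right (by omega)]
      have h1 : base.length + k' - base.length = k' := by omega
      rw [h1, List.getElem?_replicate_of_lt (by omega)]
    have hadd : base.length + (k' + 1) = (base.length + k') + 1 := by omega
    rw [hadd, trimCountB, if_pos hcond, ih (by omega)]

-- reversed form: a list with a non-None entry is (leading Nones) ++ (head non-None rest)
lemma pv_rev_decomp : ∀ (r : List (Option String)), (∃ b ∈ r, b ≠ none) →
    ∃ k d, r = List.replicate k none ++ d ∧ d ≠ [] ∧ d.head? ≠ some none := by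
  intro r
  induction r with
  | nil => rintro ⟨b, hb, _⟩; simp at hb
  | cons a t ih =>
    rintro ⟨b, hb, hbn⟩
    by_cases ha : a = none
    · subst ha
      have hbt : b ∈ t := by
        rcases List.mem_cons.mp hb with rfl | h
        · exact absurd rfl hbn
        · exact h
      obtain ⟨k, d, hrd, hdne, hdh⟩ := ih ⟨b, hbt, hbn⟩
      exact ⟨k + 1, d, by rw [List.replicate_succ]; simp [hrd], hdne, hdh⟩
    · exact ⟨0, a :: t, by simp, by simp, by simpa using ha⟩

-- every list with a non-None entry splits as base ++ replicate k none, base ending non-None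
lemma pv_decomp (bits : List (Option String)) (h : ∃ b ∈ bits, b ≠ none) :
    ∃ base k, bits = base ++ List.replicate k none ∧ base ≠ [] ∧ base.getLast? ≠ some none := by
  obtain ⟨k, d, hrd, hdne, hdh⟩ := pv_rev_decomp bits.reverse
    (by obtain ⟨b, hb, hbn⟩ := h; exact ⟨b, by simpa using hb, hbn⟩)
  refine ⟨d.reverse, k, ?_, by simpa using hdne, ?_⟩
  · have : bits = bits.reverse.reverse := by simp
    rw [this, hrd, List.reverse_append]
    simp
  · rw [List.getLast?_reverse]
    exact hdh

-- ===== VERDICT (by name: the statement is the Claim_ definition above) =====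
theorem possibleResults_spec : Claim_equal_possibleResults := by
  intro bits _ hpre
  unfold Spec_possibleResults
  obtain ⟨base, k, rfl, hb, hl⟩ := pv_decomp bits hpre
  have hlen : (base ++ List.replicate k none).length = base.length + k := by simp
  unfold possibleResults possibleResults_alt
  rw [loopA_eq]
  rw [hlen, trimLoopA_spec base hb hl k (base.length + k) (by omega),
      trimCountB_spec base hl k k (le_refl k)]
  simp only [List.flatMap_cons, List.flatMap_nil, List.append_nil, List.nil_append]
  rcases Nat.eq_zero_or_pos k with hk0 | hkpos
  · subst hk0
    rw [if_neg (by omega)]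
    simp
  · rw [if_pos (by omega)]
    have hc : ((base.length : Int) + 1) = ((base.length + 1 : Nat) : Int) := by push_cast; ring
    rw [hc, PySem.List.slice_to_natCast, List.take_append]
    have : min k 1 = 1 := by omega
    rw [this]
    have ht1 : (List.replicate k (none : Option String)).take 1 = List.replicate 1 none := by
      rw [List.take_replicate]
      congr 1
      omega
    have : base.length + 1 - base.length = 1 := by omega
    rw [this, ht1, List.take_of_length_le (by omega)]

@[simp]
theorem possibleResults_raises : Claim_raises_possibleResults := by
  unfold Claim_raises_possibleResults
  constructor
  · rintro bits _ (rfl | hall) ⟨b, hb, hbn⟩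
    · simp at hb
    · exact hbn (hall b hb)
  · refine ⟨by decide, by decide, ?_⟩
    show possibleResults_alt [none] = _
    unfold possibleResults_alt
    have h1 : trimCountB [none] 1 = 0 := by
      simp [trimCountB, PySem.List.pyGet?_natCast]
    simp only [List.length_cons, List.length_nil, h1, Nat.zero_lt_one, if_true, if_pos]
    rw [if_pos (show (0 : Nat) < 0 + 1 by omega)]
    have hs : PySem.List.slice [(none : Option String)] none (some (((0 : Nat) : Int) + 1)) = [none] := by
      have h01 : (((0 : Nat) : Int) + 1) = ((1 : Nat) : Int) := by norm_num
      rw [h01, PySem.List.slice_to_natCast]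
      simp
    rw [hs, show [(none : Option String)] = [] ++ none :: [] from rfl,
        completeB_of_mem [] [] (by simp), completeB_of_not_mem _ (by simp),
        completeB_of_not_mem _ (by simp)]
    simp [pvRaiseWitnessOut_possibleResults]
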